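-- pv_equiv track=rewrite | github.com/Quantum-Buddies/bradford_hackathon_gene_sequencing | prepare_autoregressive_data.py | extract_kmers
-- ===== SOURCE A (Python) =====
-- def extract_kmers(sequence: str, k: int = 6) -> list:
--     """Extract overlapping k-mers from sequence."""
--     sequence = sequence.upper().replace('U', 'T')
--     kmers = []
--     for i in range(len(sequence) - k + 1):
--         kmer = sequence[i:i+k]
--         if all(n in 'ACGT' for n in kmer):
--             kmers.append(kmer)
--     return kmers
-- ===== SOURCE B (Python) =====
-- def extract_kmers(sequence: str, k: int = 6) -> list:
--     """Extract overlapping k-mers from sequence (one-pass sliding window)."""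
--     seq = sequence.upper().replace('U', 'T')
--     if k <= 0:
--         return []
--     kmers = []
--     window = ''
--     for ch in seq:
--         if ch in 'ACGT':
--             window = (window + ch)[-k:]
--             if len(window) == k:
--                 kmers.append(window)
--         else:
--             window = ''
--     return kmers
-- ===== Notes on version B (the rewrite author's own statement) =====
-- stated objective: faster
-- what changed: Replaces A's per-start-index slicing with an all() validity re-scan of every window by a single left-to-right pass that maintains a sliding window of the last <= k valid characters and emits it whenever it reaches length k; B returns [] for degenerate k <= 0.
-- intended difference: For k <= 0 A returns a nonempty list of accidental empty/partial slices produced by Python's degenerate slice arithmetic (e.g. ['', '', '', '', ''] for ('ACGT', 0)); B returns [], the intended value since no k-mer of non-positive length exists. — e.g. on extract_kmers("ACGT", 0): A returns ["", "", "", "", ""], B returns []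
import Mathlib
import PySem

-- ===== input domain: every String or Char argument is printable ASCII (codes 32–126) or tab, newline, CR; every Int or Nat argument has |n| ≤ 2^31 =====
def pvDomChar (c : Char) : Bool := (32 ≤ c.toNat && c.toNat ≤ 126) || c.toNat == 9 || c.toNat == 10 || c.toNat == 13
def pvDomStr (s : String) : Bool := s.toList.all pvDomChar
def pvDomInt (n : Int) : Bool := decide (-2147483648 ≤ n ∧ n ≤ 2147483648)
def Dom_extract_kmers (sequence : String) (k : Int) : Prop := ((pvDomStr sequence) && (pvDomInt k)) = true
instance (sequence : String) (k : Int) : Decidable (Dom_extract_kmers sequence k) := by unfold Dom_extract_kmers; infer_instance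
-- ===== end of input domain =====

-- B replaces A's per-window re-scan (slice + all() for every start index) by a single left-to-right
-- pass maintaining a sliding window of the last <= k valid characters; for degenerate k <= 0, where A's
-- slicing yields accidental empty/partial strings, B returns [] (the intended difference D_ below).


-- ===== PORT A =====
def extract_kmers (sequence : String) (k : Int) : List String :=
  let seq := PySem.Chars.replace (PySem.Chars.upper sequence.toList) ['U'] ['T']
  (PySem.List.pyRange 0 ((seq.length : Int) - k + 1)).foldl
    (fun kmers i =>
      let kmer := PySem.List.slice seq (some i) (some (i + k))
      if kmer.all (fun n => PySem.Chars.isIn [n] ['A', 'C', 'G', 'T'])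
      then kmers ++ [String.ofList kmer] else kmers) []

-- ===== PORT B =====
def extract_kmers_alt (sequence : String) (k : Int) : List String :=
  let seq := PySem.Chars.replace (PySem.Chars.upper sequence.toList) ['U'] ['T']
  if k ≤ 0 then []
  else
    (seq.foldl
      (fun st ch =>
        if PySem.Chars.isIn [ch] ['A', 'C', 'G', 'T'] then
          let w := PySem.List.slice (st.2 ++ [ch]) (some (-k)) none
          ((if (w.length : Int) = k then st.1 ++ [String.ofList w] else st.1), w)
        else (st.1, ([] : List Char)))
      (([] : List String), ([] : List Char))).1

-- ===== PRECONDITION & SPEC =====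
-- On k ≤ 0 A returns a nonempty list of accidental empty/partial slices (Python's degenerate slice
-- arithmetic), while B returns the intended []: there is no k-mer of non-positive length.
def D_extract_kmers (sequence : String) (k : Int) : Prop := k ≤ 0
instance (sequence : String) (k : Int) : Decidable (D_extract_kmers sequence k) := by unfold D_extract_kmers; infer_instance

def Spec_extract_kmers (sequence : String) (k : Int) (out : List String) : Prop := ¬ D_extract_kmers sequence k → out = extract_kmers_alt sequence k
instance (sequence : String) (k : Int) (out : List String) : Decidable (Spec_extract_kmers sequence k out) := by unfold Spec_extract_kmers; infer_instance

def pvDiffWitness_extract_kmers : String × Int := ("ACGT", 0)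
def pvDiffWitnessOut_extract_kmers : (List String) × (List String) := (["", "", "", "", ""], [])

-- ===== CLAIM (what is proved, stated in full; the proofs are below) =====
def Claim_unchanged_extract_kmers : Prop := ∀ (sequence : String) (k : Int), Dom_extract_kmers sequence k → Spec_extract_kmers sequence k (extract_kmers sequence k)
def Claim_changed_extract_kmers : Prop := Dom_extract_kmers (pvDiffWitness_extract_kmers.1) (pvDiffWitness_extract_kmers.2) ∧ D_extract_kmers (pvDiffWitness_extract_kmers.1) (pvDiffWitness_extract_kmers.2) ∧ extract_kmers (pvDiffWitness_extract_kmers.1) (pvDiffWitness_extract_kmers.2) = pvDiffWitnessOut_extract_kmers.1 ∧ extract_kmers_alt (pvDiffWitness_extract_kmers.1) (pvDiffWitness_extract_kmers.2) = pvDiffWitnessOut_extract_kmers.2 ∧ pvDiffWitnessOut_extract_kmers.1 ≠ pvDiffWitnessOut_extract_kmers.2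
def Claim_exact_extract_kmers : Prop := ∀ (sequence : String) (k : Int), Dom_extract_kmers sequence k → D_extract_kmers sequence k → extract_kmers sequence k ≠ extract_kmers_alt sequence k

-- ===== LEMMAS AND PROOFS =====

def pvValid (c : Char) : Bool := PySem.Chars.isIn [c] ['A', 'C', 'G', 'T']
def pvWin (m : Nat) (P : List Char) : List Char := ((P.reverse.takeWhile pvValid).take m).reverse
def pvAns (m : Nat) (P : List Char) : List String :=
  ((List.range (P.length + 1 - m)).filter (fun i => ((P.drop i).take m).all pvValid)).map
    (fun i => String.ofList ((P.drop i).take m))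

lemma pv_sub_frozen (P : List Char) (c : Char) (i m : Nat) (h : i + m ≤ P.length) :
    (((P ++ [c]).drop i).take m) = ((P.drop i).take m) := by
  rw [List.drop_append_of_le_length (by omega), List.take_append_of_le_length (by simp; omega)]

-- split the range of pvAns (m ≤ n+1 case), with the first part frozen
lemma pvAns_split (m : Nat) (P : List Char) (c : Char) (hmP : m ≤ P.length + 1) :
    pvAns m (P ++ [c]) = pvAns m P ++
      (((List.filter (fun i => (((P ++ [c]).drop i).take m).all pvValid) [P.length + 1 - m])).map
        (fun i => String.ofList (((P ++ [c]).drop i).take m))) := by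
  unfold pvAns
  have hr : (P ++ [c]).length + 1 - m = (P.length + 1 - m) + 1 := by simp; omega
  rw [hr, List.range_succ, List.filter_append, List.map_append]
  congr 1
  · rw [List.filter_congr (fun i hi => by
        rw [pv_sub_frozen P c i m (by simp at hi; omega)]),
      List.map_congr_left (fun i hi => by
        rw [pv_sub_frozen P c i m (by
          have := List.mem_filter.mp hi; simp at this; omega)])]

lemma pv_all_take_iff (p : Char → Bool) : ∀ (l : List Char) (m : Nat), m ≤ l.length →
    (((l.take m).all p = true) ↔ m ≤ (l.takeWhile p).length) := by
  intro l
  induction l with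
  | nil => intro m hm; simp at hm; simp [hm]
  | cons a l ih =>
    intro m hm
    cases m with
    | zero => simp
    | succ m =>
      by_cases ha : p a = true
      · simp [ha, ih m (by simpa using hm)]
      · simp [List.all_cons, ha]

lemma pv_last (m : Nat) (P : List Char) (c : Char) (hmP : m ≤ P.length + 1) :
    ((P ++ [c]).drop (P.length + 1 - m)).take m = ((P ++ [c]).reverse.take m).reverse := by
  have h1 : P.length + 1 - m = (P ++ [c]).length - m := by simp
  rw [h1, List.take_reverse, List.reverse_reverse]
  exact List.take_of_length_le (by simp; omega)

lemma pvAns_step_invalid (m : Nat) (hm : 1 ≤ m) (P : List Char) (c : Char) (hc : pvValid c = false) :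
    pvAns m (P ++ [c]) = pvAns m P := by
  by_cases hmP : m ≤ P.length + 1
  · rw [pvAns_split m P c hmP]
    have : (((P ++ [c]).drop (P.length + 1 - m)).take m).all pvValid = false := by
      rw [pv_last m P c hmP]
      obtain ⟨m', rfl⟩ : ∃ m', m = m' + 1 := ⟨m - 1, by omega⟩
      simp [List.reverse_append, hc]
    simp [this]
  · unfold pvAns
    have h1 : (P ++ [c]).length + 1 - m = 0 := by simp; omega
    have h2 : P.length + 1 - m = 0 := by omega
    rw [h1, h2]; simp

lemma pvAns_step_valid (m : Nat) (hm : 1 ≤ m) (P : List Char) (c : Char) (hc : pvValid c = true) :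
    pvAns m (P ++ [c]) = if m ≤ (P.reverse.takeWhile pvValid).length + 1
      then pvAns m P ++ [String.ofList (((P ++ [c]).reverse.take m).reverse)]
      else pvAns m P := by
  have ht : (P ++ [c]).reverse.takeWhile pvValid = c :: P.reverse.takeWhile pvValid := by
    simp [List.reverse_append, hc]
  by_cases hmP : m ≤ P.length + 1
  · rw [pvAns_split m P c hmP]
    have hiff : (((P ++ [c]).drop (P.length + 1 - m)).take m).all pvValid = true
        ↔ m ≤ (P.reverse.takeWhile pvValid).length + 1 := by
      rw [pv_last m P c hmP, List.all_reverse,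
        pv_all_take_iff pvValid ((P ++ [c]).reverse) m (by simp; omega), ht]
      simp
    by_cases hcond : m ≤ (P.reverse.takeWhile pvValid).length + 1
    · rw [if_pos hcond]
      have := hiff.mpr hcond
      have hone : List.filter (fun i => (((P ++ [c]).drop i).take m).all pvValid)
          [P.length + 1 - m] = [P.length + 1 - m] := by simp [this]
      rw [hone, List.map_cons, List.map_nil, pv_last m P c hmP]
    · rw [if_neg hcond]
      have : (((P ++ [c]).drop (P.length + 1 - m)).take m).all pvValid = false := by
        rw [Bool.eq_false_iff]; intro h; exact hcond (hiff.mp h)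
      simp [this]
  · have hcond : ¬ m ≤ (P.reverse.takeWhile pvValid).length + 1 := by
      have h := (List.takeWhile_sublist (l := P.reverse) pvValid).length_le
      rw [List.length_reverse] at h; omega
    rw [if_neg hcond]
    unfold pvAns
    have h1 : (P ++ [c]).length + 1 - m = 0 := by simp; omega
    have h2 : P.length + 1 - m = 0 := by omega
    rw [h1, h2]; simp

lemma pvWin_step_invalid (m : Nat) (P : List Char) (c : Char) (hc : pvValid c = false) :
    pvWin m (P ++ [c]) = [] := by
  simp [pvWin, List.reverse_append, hc]

lemma pv_drop_rev (l : List Char) (m : Nat) : l.drop (l.length - m) = (l.reverse.take m).reverse := by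
  rw [List.take_reverse, List.reverse_reverse]

lemma pv_last_eq_win (m : Nat) (hm : 1 ≤ m) (P : List Char) (c : Char) (hc : pvValid c = true)
    (hcond : m ≤ (P.reverse.takeWhile pvValid).length + 1) :
    ((P ++ [c]).reverse.take m).reverse = pvWin m (P ++ [c]) := by
  obtain ⟨m', rfl⟩ : ∃ m', m = m' + 1 := ⟨m - 1, by omega⟩
  obtain ⟨u, hu⟩ := List.takeWhile_prefix (l := P.reverse) pvValid
  have htk : P.reverse.take m' = (P.reverse.takeWhile pvValid).take m' := by
    conv_lhs => rw [← hu]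
    rw [List.take_append_of_le_length (by omega)]
  unfold pvWin
  rw [List.reverse_append]
  simp only [List.reverse_cons, List.reverse_nil, List.nil_append, List.singleton_append,
    List.takeWhile_cons, hc, if_true, List.take_succ_cons]
  rw [htk]

lemma pvWin_valid_step (m : Nat) (hm : 1 ≤ m) (P : List Char) (c : Char) (hc : pvValid c = true) :
    (pvWin m P ++ [c]).drop ((pvWin m P ++ [c]).length - m) = pvWin m (P ++ [c]) := by
  obtain ⟨m', rfl⟩ : ∃ m', m = m' + 1 := ⟨m - 1, by omega⟩
  rw [pv_drop_rev]
  unfold pvWin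
  rw [List.reverse_append]
  simp only [List.reverse_cons, List.reverse_nil, List.nil_append, List.singleton_append,
    List.reverse_reverse, List.take_succ_cons, List.take_take]
  simp [hc]

lemma pvWin_len (m : Nat) (hm : 1 ≤ m) (P : List Char) (c : Char) (hc : pvValid c = true) :
    (pvWin m (P ++ [c])).length = min m ((P.reverse.takeWhile pvValid).length + 1) := by
  obtain ⟨m', rfl⟩ : ∃ m', m = m' + 1 := ⟨m - 1, by omega⟩
  unfold pvWin
  rw [List.reverse_append]
  simp only [List.reverse_cons, List.reverse_nil, List.nil_append, List.singleton_append,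
    List.takeWhile_cons, hc, if_true]
  simp [List.length_take]

lemma pvAns_step_valid' (m : Nat) (hm : 1 ≤ m) (P : List Char) (c : Char) (hc : pvValid c = true) :
    pvAns m (P ++ [c]) = if m ≤ (P.reverse.takeWhile pvValid).length + 1
      then pvAns m P ++ [String.ofList (pvWin m (P ++ [c]))]
      else pvAns m P := by
  rw [pvAns_step_valid m hm P c hc]
  by_cases hcond : m ≤ (P.reverse.takeWhile pvValid).length + 1
  · rw [if_pos hcond, if_pos hcond, pv_last_eq_win m hm P c hc hcond]
  · rw [if_neg hcond, if_neg hcond]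

lemma pv_foldB (m : Nat) (hm : 1 ≤ m) (P : List Char) :
    P.foldl (fun st ch =>
        if PySem.Chars.isIn [ch] ['A', 'C', 'G', 'T'] then
          let w := PySem.List.slice (st.2 ++ [ch]) (some (-(m : Int))) none
          ((if (w.length : Int) = (m : Int) then st.1 ++ [String.ofList w] else st.1), w)
        else (st.1, ([] : List Char))) (([] : List String), ([] : List Char))
      = (pvAns m P, pvWin m P) := by
  induction P using List.reverseRecOn with
  | nil =>
    have h0 : 1 - m = 0 := by omega
    simp [pvAns, pvWin, h0]
  | append_singleton P c ih =>
    rw [List.foldl_append, ih, List.foldl_cons, List.foldl_nil]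
    have hval : PySem.Chars.isIn [c] ['A', 'C', 'G', 'T'] = pvValid c := rfl
    by_cases hc : pvValid c = true
    · rw [hval, if_pos hc]
      have hsl : PySem.List.slice (pvWin m P ++ [c]) (some (-(m : Int))) none
          = (pvWin m P ++ [c]).drop ((pvWin m P ++ [c]).length - m) :=
        PySem.List.slice_from_neg_natCast _ m (by omega)
      simp only [hsl, pvWin_valid_step m hm P c hc]
      have hlen : (pvWin m (P ++ [c])).length = min m ((P.reverse.takeWhile pvValid).length + 1) :=
        pvWin_len m hm P c hc
      rw [pvAns_step_valid' m hm P c hc]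
      by_cases hcond : m ≤ (P.reverse.takeWhile pvValid).length + 1
      · rw [if_pos hcond]
        have : ((pvWin m (P ++ [c])).length : Int) = (m : Int) := by
          rw [hlen]; congr 1; omega
        rw [if_pos this]
      · rw [if_neg hcond]
        have : ¬ ((pvWin m (P ++ [c])).length : Int) = (m : Int) := by
          rw [hlen]; intro h; rw [Int.natCast_inj] at h; omega
        rw [if_neg this]
    · rw [hval, if_neg hc]
      rw [pvAns_step_invalid m hm P c (by simpa using hc), pvWin_step_invalid m P c (by simpa using hc)]

lemma pv_A (m : Nat) (seq : List Char) :
    (PySem.List.pyRange 0 ((seq.length : Int) - (m : Int) + 1)).foldl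
      (fun kmers i =>
        let kmer := PySem.List.slice seq (some i) (some (i + (m : Int)))
        if kmer.all (fun n => PySem.Chars.isIn [n] ['A', 'C', 'G', 'T'])
        then kmers ++ [String.ofList kmer] else kmers) []
    = pvAns m seq := by
  show (PySem.List.pyRange 0 ((seq.length : Int) - (m : Int) + 1)).foldl
      (fun kmers i =>
        if (fun i => (PySem.List.slice seq (some i) (some (i + (m : Int)))).all pvValid) i = true
        then kmers ++ [(fun i => String.ofList (PySem.List.slice seq (some i) (some (i + (m : Int))))) i]
        else kmers) [] = pvAns m seq
  rw [PySem.List.foldl_append_if, List.nil_append, PySem.List.pyRange_one, List.filter_map,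
    List.map_map]
  have hN : (((seq.length : Int)) - (m : Int) + 1 - 0).toNat = seq.length + 1 - m := by omega
  rw [hN]
  unfold pvAns
  simp only [Function.comp_def, zero_add, PySem.List.slice_natCast_add]

lemma pv_main (sequence : String) (k : Int) (hk : 0 < k) :
    extract_kmers sequence k = extract_kmers_alt sequence k := by
  lift k to Nat using le_of_lt hk with m
  have hm : 1 ≤ m := by omega
  unfold extract_kmers extract_kmers_alt
  rw [if_neg (by omega)]
  rw [pv_foldB m hm (PySem.Chars.replace (PySem.Chars.upper sequence.toList) ['U'] ['T'])]
  exact pv_A m _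

-- A's result for k ≤ 0 always contains the empty slice produced by the final loop index, so it is nonempty.
lemma pv_A_ne_nil (sequence : String) (k : Int) (hk : k ≤ 0) :
    extract_kmers sequence k ≠ [] := by
  unfold extract_kmers
  show (PySem.List.pyRange 0 (((PySem.Chars.replace (PySem.Chars.upper sequence.toList) ['U'] ['T']).length : Int) - k + 1)).foldl
      (fun kmers i =>
        if (fun i => (PySem.List.slice (PySem.Chars.replace (PySem.Chars.upper sequence.toList) ['U'] ['T']) (some i) (some (i + k))).all
            (fun n => PySem.Chars.isIn [n] ['A', 'C', 'G', 'T'])) i = true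
        then kmers ++ [(fun i => String.ofList (PySem.List.slice (PySem.Chars.replace (PySem.Chars.upper sequence.toList) ['U'] ['T']) (some i) (some (i + k)))) i]
        else kmers) [] ≠ []
  rw [PySem.List.foldl_append_if, List.nil_append]
  set seq := PySem.Chars.replace (PySem.Chars.upper sequence.toList) ['U'] ['T'] with hseq
  have hmem : ((seq.length : Int) - k) ∈ PySem.List.pyRange 0 ((seq.length : Int) - k + 1) := by
    rw [PySem.List.mem_pyRange_one]
    constructor <;> omega
  have hp : (PySem.List.slice seq (some ((seq.length : Int) - k)) (some (((seq.length : Int) - k) + k))).all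
      (fun n => PySem.Chars.isIn [n] ['A', 'C', 'G', 'T']) = true := by
    have h1 : ((seq.length : Int) - k) + k = (seq.length : Int) := by omega
    rw [h1, PySem.List.slice_toNat (xs := seq) (a := (seq.length : Int) - k)
      (b := (seq.length : Int)) (by omega) (by omega)]
    rw [List.drop_eq_nil_of_le (by omega)]
    simp
  intro hnil
  have : String.ofList (PySem.List.slice seq (some ((seq.length : Int) - k)) (some (((seq.length : Int) - k) + k)))
      ∈ ([] : List String) := by
    rw [← hnil]
    exact List.mem_map_of_mem (List.mem_filter.mpr ⟨hmem, hp⟩)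
  simp at this

-- ===== VERDICT (by name: the statement is the Claim_ definition above) =====
theorem extract_kmers_spec : Claim_unchanged_extract_kmers := by
  intro sequence k _ hD
  unfold D_extract_kmers at hD
  exact pv_main sequence k (by omega)

theorem extract_kmers_changed : Claim_changed_extract_kmers := by
  unfold Claim_changed_extract_kmers; decide

theorem extract_kmers_tight : Claim_exact_extract_kmers := by
  intro sequence k _ hD
  unfold D_extract_kmers at hD
  intro heq
  apply pv_A_ne_nil sequence k hD
  rw [heq]
  unfold extract_kmers_alt
  rw [if_pos hD]
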